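-- pv_equiv track=rewrite | github.com/Jaceyli/COMP9021-17S2 | Assignment/Assignment_1/pivoting_die.py | turn_right
-- ===== SOURCE A (Python) =====
-- L = [6, 5, 4, 3, 2, 1]
--
-- def turn_right(top, front, right, n):
--     n %= 4
--     if n == 0:
--         return top, front, right
--     elif n == 1:
--         return L[right - 1], front, top
--     else:
--         return turn_right(L[right - 1], front, top, n - 1)
-- ===== SOURCE B (Python) =====
-- L = [6, 5, 4, 3, 2, 1]
--
-- def turn_right(top, front, right, n):
--     for _ in range(n % 4):
--         top, right = L[right - 1], top
--     return top, front, right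
-- ===== Notes on version B (the rewrite author's own statement) =====
-- stated objective: simpler
-- what changed: Replaces A's special-cased recursion (n==0 / n==1 / recursive call) with a single uniform iterative loop that applies the rotation step n%4 times over an accumulator.
-- outside the precondition, e.g. on turn_right(1, 2, 99, 1): A raises IndexError, B raises IndexError
import Mathlib
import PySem

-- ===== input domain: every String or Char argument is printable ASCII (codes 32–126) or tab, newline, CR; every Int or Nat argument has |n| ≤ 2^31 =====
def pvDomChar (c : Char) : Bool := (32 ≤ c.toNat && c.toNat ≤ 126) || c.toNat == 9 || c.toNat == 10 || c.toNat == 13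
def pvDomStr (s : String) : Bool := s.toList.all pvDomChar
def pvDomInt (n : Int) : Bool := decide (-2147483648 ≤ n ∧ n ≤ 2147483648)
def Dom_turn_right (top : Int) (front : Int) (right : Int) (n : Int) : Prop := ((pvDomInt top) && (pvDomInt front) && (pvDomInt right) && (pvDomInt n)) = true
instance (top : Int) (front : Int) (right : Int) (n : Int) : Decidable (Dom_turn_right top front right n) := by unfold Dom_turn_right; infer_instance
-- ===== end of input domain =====

-- B replaces A's special-cased recursion with one uniform loop applying the rotation step n%4 times (simpler decomposition; return value only).

-- the module constant L (shared by both Pythons)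
def pvL : List Int := [6, 5, 4, 3, 2, 1]

-- ===== PORT A =====
-- L[right-1] via Python indexing; .getD 0 is unreachable under Pre_ (IndexError excluded)
def turn_right_go : Int → Int → Int → Nat → Int × Int × Int
  | top, front, right, 0 => (top, front, right)
  | _top, front, right, 1 => ((PySem.List.pyGet? pvL (right - 1)).getD 0, front, _top)
  | top, front, right, (k+2) => turn_right_go ((PySem.List.pyGet? pvL (right - 1)).getD 0) front top (k+1)

def turn_right (top : Int) (front : Int) (right : Int) (n : Int) : Int × Int × Int :=
  turn_right_go top front right (PySem.Int.mod n 4).toNat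

-- ===== PORT B =====
def turn_right_alt (top : Int) (front : Int) (right : Int) (n : Int) : Int × Int × Int :=
  (PySem.List.pyRange 0 (PySem.Int.mod n 4) 1).foldl
    (fun s _ => ((PySem.List.pyGet? pvL (s.2.2 - 1)).getD 0, s.2.1, s.1))
    (top, front, right)

-- ===== PRECONDITION & SPEC =====
-- Pre_ excludes exactly the inputs where Python A raises IndexError: the first rotation
-- step indexes L[right-1] (needed when n%4 ≥ 1), the second indexes L[top-1] (needed when
-- n%4 ≥ 2); the third step's index is always a face value 1..6 and never raises.
def Pre_turn_right (top : Int) (front : Int) (right : Int) (n : Int) : Prop :=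
  (1 ≤ PySem.Int.mod n 4 → -5 ≤ right ∧ right ≤ 6) ∧
  (2 ≤ PySem.Int.mod n 4 → -5 ≤ top ∧ top ≤ 6)
instance (top : Int) (front : Int) (right : Int) (n : Int) : Decidable (Pre_turn_right top front right n) := by unfold Pre_turn_right; infer_instance

def pvWitness_turn_right : Int × Int × Int × Int := (1, 2, 3, 5)

def Spec_turn_right (top : Int) (front : Int) (right : Int) (n : Int) (out : Int × Int × Int) : Prop := out = turn_right_alt top front right n
instance (top : Int) (front : Int) (right : Int) (n : Int) (out : Int × Int × Int) : Decidable (Spec_turn_right top front right n out) := by unfold Spec_turn_right; infer_instance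

-- ===== CLAIM (what is proved, stated in full; the proofs are below) =====
def Claim_equal_turn_right : Prop := ∀ (top : Int) (front : Int) (right : Int) (n : Int), Dom_turn_right top front right n → Pre_turn_right top front right n → Spec_turn_right top front right n (turn_right top front right n)

-- ===== LEMMAS AND PROOFS =====

theorem pvMod4_bounds (n : Int) : 0 ≤ PySem.Int.mod n 4 ∧ PySem.Int.mod n 4 < 4 := by
  rw [PySem.Int.mod_eq_emod_of_pos (by norm_num)]
  exact ⟨Int.emod_nonneg n (by norm_num), Int.emod_lt_of_pos n (by norm_num)⟩

-- ===== VERDICT (by name: the statement is the Claim_ definition above) =====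
theorem turn_right_spec : Claim_equal_turn_right := by
  intro top front right n _ _
  unfold Spec_turn_right turn_right turn_right_alt
  obtain ⟨h0, h1⟩ := pvMod4_bounds n
  set m := PySem.Int.mod n 4 with hm
  interval_cases m <;>
    simp [turn_right_go, PySem.List.pyRange_one, List.range_succ]
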